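-- pv_equiv track=rewrite | github.com/Ricar66/Reduzindo_Planilhas | app/helpers/padronizador.py | encontrar_filial_correspondente
-- ===== SOURCE A (Python) =====
-- import unicodedata
--
-- def _simplificar_texto(texto: str) -> str:
--     """Função interna para limpar e normalizar um texto para comparação."""
--     if not texto:
--         return ""
--     # Converte para minúsculas
--     texto = texto.lower()
--     # Remove acentos
--     texto = "".join(c for c in unicodedata.normalize('NFD', texto) if unicodedata.category(c) != 'Mn')
--     # Remove caracteres não alfanuméricos (espaços, hífens, etc.)
--     texto = "".join(c for c in texto if c.isalnum())
--     return texto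
--
-- def encontrar_filial_correspondente(texto_da_planilha: str, lista_oficial_filiais: list[str]) -> str:
--     """
--     Compara um texto de filial (da planilha) com a lista oficial e retorna a correspondência correta.
--     """
--     if not texto_da_planilha or not lista_oficial_filiais:
--         return texto_da_planilha # Retorna o original se a entrada for vazia
--
--     texto_simplificado = _simplificar_texto(texto_da_planilha)
--
--     # 1ª Tentativa: Busca por correspondência exata (após simplificação)
--     for filial_oficial in lista_oficial_filiais:
--         if _simplificar_texto(filial_oficial) == texto_simplificado:
--             return filial_oficial # Encontrou! Retorna o nome oficial.
--
--     # 2ª Tentativa: Busca parcial (se o texto da planilha está contido no nome oficial)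
--     # Isso resolve casos como "Rio Preto" contido em "01-Rio Preto"
--     for filial_oficial in lista_oficial_filiais:
--         if texto_simplificado in _simplificar_texto(filial_oficial):
--             return filial_oficial # Encontrou! Retorna o nome oficial.
--
--     # Se não encontrar nenhuma correspondência, retorna o texto original da planilha
--     return texto_da_planilha
-- ===== SOURCE B (Python) =====
-- import unicodedata
--
-- def _simplificar(texto: str) -> str:
--     if not texto:
--         return ""
--     texto = texto.lower()
--     texto = "".join(c for c in unicodedata.normalize('NFD', texto) if unicodedata.category(c) != 'Mn')
--     return "".join(c for c in texto if c.isalnum())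
--
-- def encontrar_filial_correspondente(texto_da_planilha: str, lista_oficial_filiais: list[str]) -> str:
--     if not texto_da_planilha or not lista_oficial_filiais:
--         return texto_da_planilha
--     alvo = _simplificar(texto_da_planilha)
--     parcial = None
--     for oficial in lista_oficial_filiais:
--         simples = _simplificar(oficial)
--         if simples == alvo:
--             return oficial  # exact wins regardless of position
--         if parcial is None and alvo in simples:
--             parcial = oficial
--     return parcial if parcial is not None else texto_da_planilha
-- ===== Notes on version B (the rewrite author's own statement) =====
-- stated objective: faster
-- what changed: Single fused pass that simplifies each official name once and remembers the first partial match, instead of two separate passes each re-simplifying every name.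
import Mathlib
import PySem

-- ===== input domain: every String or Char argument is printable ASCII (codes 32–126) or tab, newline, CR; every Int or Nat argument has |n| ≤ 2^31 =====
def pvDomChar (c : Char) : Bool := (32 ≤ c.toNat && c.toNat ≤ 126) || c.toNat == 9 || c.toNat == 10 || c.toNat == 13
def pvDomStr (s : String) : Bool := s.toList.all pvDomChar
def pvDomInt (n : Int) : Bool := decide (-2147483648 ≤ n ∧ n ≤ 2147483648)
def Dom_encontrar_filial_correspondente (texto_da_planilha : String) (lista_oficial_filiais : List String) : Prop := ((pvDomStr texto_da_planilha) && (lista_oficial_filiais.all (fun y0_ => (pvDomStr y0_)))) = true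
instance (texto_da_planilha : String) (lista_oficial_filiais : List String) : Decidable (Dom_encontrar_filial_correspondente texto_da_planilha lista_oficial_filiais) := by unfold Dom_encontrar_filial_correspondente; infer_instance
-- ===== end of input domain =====

-- B fuses A's two scans into one pass that simplifies each official name once and
-- remembers the first partial match (objective: faster by a constant factor).


-- ===== PORT A =====
-- _simplificar_texto: lower-case then keep alphanumeric chars. The unicodedata NFD /
-- combining-mark step is the identity on the ASCII domain (no accents, no 'Mn' chars),
-- so it is exact to omit it here; both Pythons perform it identically.
def pvSimplificar (s : List Char) : List Char :=
  if s = [] then []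
  else (PySem.Chars.lower s).filter PySem.Str.isalnum

def encontrar_filial_correspondente (texto_da_planilha : String) (lista_oficial_filiais : List String) : String :=
  if texto_da_planilha.toList = [] ∨ lista_oficial_filiais = [] then texto_da_planilha
  else
    let ts := pvSimplificar texto_da_planilha.toList
    -- 1st pass: first exact (post-simplification) match
    match lista_oficial_filiais.find? (fun f => pvSimplificar f.toList == ts) with
    | some f => f
    | none =>
      -- 2nd pass: first partial match (simplified text contained in simplified name)
      match lista_oficial_filiais.find? (fun f => PySem.Chars.isIn ts (pvSimplificar f.toList)) with
      | some f => f
      | none => texto_da_planilha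

-- ===== PORT B =====
-- single fused pass: return on exact match, remember the first partial match
def pvLoopB (texto : String) (alvo : List Char) : List String → Option String → String
  | [], parcial => parcial.getD texto
  | f :: rest, parcial =>
    let s := pvSimplificar f.toList
    if s == alvo then f
    else pvLoopB texto alvo rest (if parcial.isNone && PySem.Chars.isIn alvo s then some f else parcial)

def encontrar_filial_correspondente_alt (texto_da_planilha : String) (lista_oficial_filiais : List String) : String :=
  if texto_da_planilha.toList = [] ∨ lista_oficial_filiais = [] then texto_da_planilha
  else pvLoopB texto_da_planilha (pvSimplificar texto_da_planilha.toList) lista_oficial_filiais none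

-- ===== PRECONDITION & SPEC =====
def Spec_encontrar_filial_correspondente (texto_da_planilha : String) (lista_oficial_filiais : List String) (out : String) : Prop := out = encontrar_filial_correspondente_alt texto_da_planilha lista_oficial_filiais
instance (texto_da_planilha : String) (lista_oficial_filiais : List String) (out : String) : Decidable (Spec_encontrar_filial_correspondente texto_da_planilha lista_oficial_filiais out) := by unfold Spec_encontrar_filial_correspondente; infer_instance

-- ===== CLAIM (what is proved, stated in full; the proofs are below) =====
def Claim_equal_encontrar_filial_correspondente : Prop := ∀ (texto_da_planilha : String) (lista_oficial_filiais : List String), Dom_encontrar_filial_correspondente texto_da_planilha lista_oficial_filiais → Spec_encontrar_filial_correspondente texto_da_planilha lista_oficial_filiais (encontrar_filial_correspondente texto_da_planilha lista_oficial_filiais)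

-- ===== LEMMAS AND PROOFS =====

-- once a partial match is remembered, only an exact match can change the result
lemma pvLoopB_some (texto : String) (alvo : List Char) (l : List String) (p : String) :
    pvLoopB texto alvo l (some p)
      = (l.find? (fun f => pvSimplificar f.toList == alvo)).getD p := by
  induction l with
  | nil => rfl
  | cons f rest ih =>
    simp only [pvLoopB, List.find?]
    by_cases h : pvSimplificar f.toList == alvo
    · simp [h]
    · simp only [h, Bool.false_eq_true, if_false, Option.isNone_some, Bool.false_and, if_neg]
      simpa using ih

-- with nothing remembered, the fused pass computes A's two-pass result
lemma pvLoopB_none (texto : String) (alvo : List Char) (l : List String) :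
    pvLoopB texto alvo l none
      = (match l.find? (fun f => pvSimplificar f.toList == alvo) with
         | some f => f
         | none =>
           match l.find? (fun f => PySem.Chars.isIn alvo (pvSimplificar f.toList)) with
           | some f => f
           | none => texto) := by
  induction l with
  | nil => rfl
  | cons f rest ih =>
    simp only [pvLoopB, List.find?]
    by_cases h : pvSimplificar f.toList == alvo
    · simp [h]
    · by_cases hs : PySem.Chars.isIn alvo (pvSimplificar f.toList)
      · simp only [h, Bool.false_eq_true, if_false, Option.isNone_none, Bool.true_and, hs, if_true]
        rw [pvLoopB_some]
        cases rest.find? (fun f => pvSimplificar f.toList == alvo) <;> simp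
      · simp only [h, Bool.false_eq_true, if_false, Option.isNone_none, Bool.true_and, hs, if_false]
        exact ih

-- ===== VERDICT (by name: the statement is the Claim_ definition above) =====
theorem encontrar_filial_correspondente_spec : Claim_equal_encontrar_filial_correspondente := by
  intro t l _
  unfold Spec_encontrar_filial_correspondente
  unfold encontrar_filial_correspondente encontrar_filial_correspondente_alt
  by_cases hg : t.toList = [] ∨ l = []
  · rw [if_pos hg, if_pos hg]
  · rw [if_neg hg, if_neg hg, pvLoopB_none]
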